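-- pv_equiv track=rewrite | github.com/askrobots/dbbasic | dbbasic_ai_service_builder.py | generate_input_extraction
-- ===== SOURCE A (Python) =====
-- from typing import Dict, Any, Optional, List
--
-- def generate_input_extraction(inputs: List[str]) -> str:
--     """Generate input extraction code"""
--     lines = []
--     for input_name in inputs:
--         # Infer type from name
--         default = "None"
--         if 'id' in input_name or 'count' in input_name or 'quantity' in input_name:
--             default = "0"
--         elif 'flag' in input_name or 'is_' in input_name:
--             default = "False"
--         elif 'name' in input_name or 'email' in input_name:
--             default = "''"
--         elif 'list' in input_name or 'items' in input_name:
--             default = "[]"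
--
--         lines.append(f"        {input_name} = data.get('{input_name}', {default})")
--
--     return "\n".join(lines)
-- ===== SOURCE B (Python) =====
-- from typing import List
--
-- _DEFAULTS = ("0", "False", "''", "[]", "None")
--
--
-- def _priority_at(name: str, i: int) -> int:
--     """Priority of the best keyword starting at position i (4 = no keyword here)."""
--     if name.startswith('id', i) or name.startswith('count', i) or name.startswith('quantity', i):
--         return 0
--     if name.startswith('flag', i) or name.startswith('is_', i):
--         return 1
--     if name.startswith('name', i) or name.startswith('email', i):
--         return 2
--     if name.startswith('list', i) or name.startswith('items', i):
--         return 3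
--     return 4
--
--
-- def generate_input_extraction(inputs: List[str]) -> str:
--     """Generate input extraction code via a single positional sweep per name:
--     the default is indexed by the minimum keyword priority found at any start
--     position of the name (instead of running whole-string substring searches)."""
--     lines = []
--     for name in inputs:
--         best = 4
--         for i in range(len(name)):
--             best = min(best, _priority_at(name, i))
--         lines.append(f"        {name} = data.get('{name}', {_DEFAULTS[best]})")
--     return "\n".join(lines)
-- ===== Notes on version B (the rewrite author's own statement) =====
-- stated objective: alternative
-- what changed: Instead of A's per-name cascade of nine whole-string substring searches, B does one left-to-right sweep over each name, computing at each start position the priority of any keyword beginning there and keeping the running minimum; the default string is then indexed by that minimum priority.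
import Mathlib
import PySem

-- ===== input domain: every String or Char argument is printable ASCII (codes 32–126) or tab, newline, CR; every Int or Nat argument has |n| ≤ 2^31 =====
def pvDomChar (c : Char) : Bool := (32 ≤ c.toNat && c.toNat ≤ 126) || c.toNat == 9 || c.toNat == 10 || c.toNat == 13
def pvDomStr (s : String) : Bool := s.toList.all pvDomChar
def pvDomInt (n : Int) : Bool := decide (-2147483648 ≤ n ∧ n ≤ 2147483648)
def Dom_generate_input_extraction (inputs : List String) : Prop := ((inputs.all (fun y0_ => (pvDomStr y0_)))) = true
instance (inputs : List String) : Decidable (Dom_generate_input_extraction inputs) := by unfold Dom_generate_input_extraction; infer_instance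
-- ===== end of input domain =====

-- B replaces A's per-name cascade of whole-string substring searches by a single positional
-- sweep per name that keeps the minimum keyword priority found at any start position
-- (alternative algorithm, same cost).

-- ===== PORT A =====
def pvLineA (input_name : String) : String :=
  let default :=
    if PySem.Str.isIn "id" input_name || PySem.Str.isIn "count" input_name || PySem.Str.isIn "quantity" input_name then "0"
    else if PySem.Str.isIn "flag" input_name || PySem.Str.isIn "is_" input_name then "False"
    else if PySem.Str.isIn "name" input_name || PySem.Str.isIn "email" input_name then "''"
    else if PySem.Str.isIn "list" input_name || PySem.Str.isIn "items" input_name then "[]"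
    else "None"
  "        " ++ input_name ++ " = data.get('" ++ input_name ++ "', " ++ default ++ ")"

def generate_input_extraction (inputs : List String) : String :=
  PySem.Str.join "\n" (inputs.foldl (fun lines input_name => lines ++ [pvLineA input_name]) [])

-- ===== PORT B =====
-- name.startswith(kw, i) for 0 ≤ i is exactly kw.toList.isPrefixOf (name.toList.drop i)
def pvPrAt (s : List Char) (i : Nat) : Nat :=
  if "id".toList.isPrefixOf (s.drop i) || "count".toList.isPrefixOf (s.drop i) || "quantity".toList.isPrefixOf (s.drop i) then 0
  else if "flag".toList.isPrefixOf (s.drop i) || "is_".toList.isPrefixOf (s.drop i) then 1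
  else if "name".toList.isPrefixOf (s.drop i) || "email".toList.isPrefixOf (s.drop i) then 2
  else if "list".toList.isPrefixOf (s.drop i) || "items".toList.isPrefixOf (s.drop i) then 3
  else 4

def pvDefaults : List String := ["0", "False", "''", "[]", "None"]

-- the 'for i in range(len(name)): best = min(best, _priority_at(name, i))' loop
def pvBest (s : List Char) : Nat :=
  (List.range s.length).foldl (fun best i => min best (pvPrAt s i)) 4

-- _DEFAULTS[best]: best is always < 5, so the positive-index lookup is exact; the
-- getD fallback is never reached.
def generate_input_extraction_alt (inputs : List String) : String :=
  PySem.Str.join "\n"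
    (inputs.foldl (fun lines name =>
      lines ++ ["        " ++ name ++ " = data.get('" ++ name ++ "', " ++ pvDefaults.getD (pvBest name.toList) "None" ++ ")"]) [])

-- ===== PRECONDITION & SPEC =====
def Spec_generate_input_extraction (inputs : List String) (out : String) : Prop := out = generate_input_extraction_alt inputs
instance (inputs : List String) (out : String) : Decidable (Spec_generate_input_extraction inputs out) := by unfold Spec_generate_input_extraction; infer_instance

-- ===== CLAIM (what is proved, stated in full; the proofs are below) =====
def Claim_equal_generate_input_extraction : Prop := ∀ (inputs : List String), Dom_generate_input_extraction inputs → Spec_generate_input_extraction inputs (generate_input_extraction inputs)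

-- ===== LEMMAS AND PROOFS =====

-- the min-fold is ≤ k iff the seed is, or some scanned value is
theorem foldl_min_le_iff (f : Nat → Nat) (l : List Nat) (b k : Nat) :
    l.foldl (fun a i => min a (f i)) b ≤ k ↔ b ≤ k ∨ ∃ i ∈ l, f i ≤ k := by
  induction l generalizing b with
  | nil => simp
  | cons x xs ih =>
    simp only [List.foldl_cons, ih, min_le_iff, List.mem_cons]
    constructor
    · rintro (⟨h | h⟩ | ⟨i, hi, h⟩)
      · exact Or.inl h
      · exact Or.inr ⟨x, Or.inl rfl, h⟩
      · exact Or.inr ⟨i, Or.inr hi, h⟩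
    · rintro (h | ⟨i, (rfl | hi), h⟩)
      · exact Or.inl (Or.inl h)
      · exact Or.inl (Or.inr h)
      · exact Or.inr ⟨i, hi, h⟩

-- 'kw occurs in name' ↔ 'kw starts at some position i < len' for nonempty kw
theorem isIn_iff_pos (kw name : String) (hkw : kw.toList ≠ []) :
    PySem.Str.isIn kw name = true ↔
      ∃ i ∈ List.range name.toList.length, kw.toList.isPrefixOf (name.toList.drop i) := by
  rw [PySem.Str.isIn_iff_infix, ← PySem.Chars.isIn_iff_infix,
      ← PySem.Chars.exists_prefix_drop_iff_isIn]
  constructor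
  · rintro ⟨j, hj⟩
    by_cases hlt : j < name.toList.length
    · exact ⟨j, List.mem_range.mpr hlt, List.isPrefixOf_iff_prefix.mpr hj⟩
    · exfalso
      rw [List.drop_eq_nil_of_le (Nat.le_of_not_lt hlt)] at hj
      exact hkw (List.prefix_nil.mp hj)
  · rintro ⟨i, _, h⟩
    exact ⟨i, List.isPrefixOf_iff_prefix.mp h⟩

-- pvPrAt s i ≤ j (for j < 4) iff a keyword of priority ≤ j starts at i
theorem prAt_le_iff (s : List Char) (i : Nat) (j : Nat) :
    pvPrAt s i ≤ j ↔
      ("id".toList.isPrefixOf (s.drop i) || "count".toList.isPrefixOf (s.drop i) || "quantity".toList.isPrefixOf (s.drop i)) = true ∨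
      (1 ≤ j ∧ ("flag".toList.isPrefixOf (s.drop i) || "is_".toList.isPrefixOf (s.drop i)) = true) ∨
      (2 ≤ j ∧ ("name".toList.isPrefixOf (s.drop i) || "email".toList.isPrefixOf (s.drop i)) = true) ∨
      (3 ≤ j ∧ ("list".toList.isPrefixOf (s.drop i) || "items".toList.isPrefixOf (s.drop i)) = true) ∨
      4 ≤ j := by
  unfold pvPrAt
  split_ifs with h0 h1 h2 h3
  · exact ⟨fun _ => Or.inl h0, fun _ => Nat.zero_le j⟩
  · constructor
    · intro hle; exact Or.inr (Or.inl ⟨hle, h1⟩)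
    · rintro (h | ⟨hle, _⟩ | ⟨hle, _⟩ | ⟨hle, _⟩ | hle)
      · exact absurd h h0
      · exact hle
      · omega
      · omega
      · omega
  · constructor
    · intro hle; exact Or.inr (Or.inr (Or.inl ⟨hle, h2⟩))
    · rintro (h | ⟨hle, hc⟩ | ⟨hle, _⟩ | ⟨hle, _⟩ | hle)
      · exact absurd h h0
      · exact absurd hc h1
      · exact hle
      · omega
      · omega
  · constructor
    · intro hle; exact Or.inr (Or.inr (Or.inr (Or.inl ⟨hle, h3⟩)))
    · rintro (h | ⟨hle, hc⟩ | ⟨hle, hc⟩ | ⟨hle, _⟩ | hle)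
      · exact absurd h h0
      · exact absurd hc h1
      · exact absurd hc h2
      · exact hle
      · omega
  · constructor
    · intro hle; exact Or.inr (Or.inr (Or.inr (Or.inr hle)))
    · rintro (h | ⟨hle, hc⟩ | ⟨hle, hc⟩ | ⟨hle, hc⟩ | hle)
      · exact absurd h h0
      · exact absurd hc h1
      · exact absurd hc h2
      · exact absurd hc h3
      · exact hle

-- pvBest equals the priority A's cascade picks
theorem pvBest_eq (name : String) :
    pvBest name.toList =
      (if PySem.Str.isIn "id" name || PySem.Str.isIn "count" name || PySem.Str.isIn "quantity" name then 0
       else if PySem.Str.isIn "flag" name || PySem.Str.isIn "is_" name then 1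
       else if PySem.Str.isIn "name" name || PySem.Str.isIn "email" name then 2
       else if PySem.Str.isIn "list" name || PySem.Str.isIn "items" name then 3
       else 4) := by
  have key : ∀ j : Nat, j < 4 → (pvBest name.toList ≤ j ↔
      (PySem.Str.isIn "id" name || PySem.Str.isIn "count" name || PySem.Str.isIn "quantity" name) = true ∨
      (1 ≤ j ∧ (PySem.Str.isIn "flag" name || PySem.Str.isIn "is_" name) = true) ∨
      (2 ≤ j ∧ (PySem.Str.isIn "name" name || PySem.Str.isIn "email" name) = true) ∨
      (3 ≤ j ∧ (PySem.Str.isIn "list" name || PySem.Str.isIn "items" name) = true)) := by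
    intro j hj
    unfold pvBest
    rw [foldl_min_le_iff]
    have h4 : ¬ (4 ≤ j) := by omega
    constructor
    · rintro (h | ⟨i, hi, h⟩)
      · omega
      · rcases (prAt_le_iff _ i j).mp h with h | ⟨hja, h⟩ | ⟨hjb, h⟩ | ⟨hjc, h⟩ | h
        · refine Or.inl ?_
          simp only [Bool.or_eq_true] at h ⊢
          rcases h with (h | h) | h
          · exact Or.inl (Or.inl ((isIn_iff_pos _ name (by decide)).mpr ⟨i, hi, h⟩))
          · exact Or.inl (Or.inr ((isIn_iff_pos _ name (by decide)).mpr ⟨i, hi, h⟩))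
          · exact Or.inr ((isIn_iff_pos _ name (by decide)).mpr ⟨i, hi, h⟩)
        · refine Or.inr (Or.inl ⟨hja, ?_⟩)
          simp only [Bool.or_eq_true] at h ⊢
          rcases h with h | h
          · exact Or.inl ((isIn_iff_pos _ name (by decide)).mpr ⟨i, hi, h⟩)
          · exact Or.inr ((isIn_iff_pos _ name (by decide)).mpr ⟨i, hi, h⟩)
        · refine Or.inr (Or.inr (Or.inl ⟨hjb, ?_⟩))
          simp only [Bool.or_eq_true] at h ⊢
          rcases h with h | h
          · exact Or.inl ((isIn_iff_pos _ name (by decide)).mpr ⟨i, hi, h⟩)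
          · exact Or.inr ((isIn_iff_pos _ name (by decide)).mpr ⟨i, hi, h⟩)
        · refine Or.inr (Or.inr (Or.inr ⟨hjc, ?_⟩))
          simp only [Bool.or_eq_true] at h ⊢
          rcases h with h | h
          · exact Or.inl ((isIn_iff_pos _ name (by decide)).mpr ⟨i, hi, h⟩)
          · exact Or.inr ((isIn_iff_pos _ name (by decide)).mpr ⟨i, hi, h⟩)
        · omega
    · intro h
      refine Or.inr ?_
      rcases h with h | ⟨hja, h⟩ | ⟨hjb, h⟩ | ⟨hjc, h⟩
      · simp only [Bool.or_eq_true] at h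
        rcases h with (h | h) | h
        · obtain ⟨i, hi, hp⟩ := (isIn_iff_pos _ name (by decide)).mp h
          exact ⟨i, hi, (prAt_le_iff _ i j).mpr (Or.inl (by simp [List.isPrefixOf_iff_prefix] at hp; simp [hp]))⟩
        · obtain ⟨i, hi, hp⟩ := (isIn_iff_pos _ name (by decide)).mp h
          exact ⟨i, hi, (prAt_le_iff _ i j).mpr (Or.inl (by simp [List.isPrefixOf_iff_prefix] at hp; simp [hp]))⟩
        · obtain ⟨i, hi, hp⟩ := (isIn_iff_pos _ name (by decide)).mp h
          exact ⟨i, hi, (prAt_le_iff _ i j).mpr (Or.inl (by simp [List.isPrefixOf_iff_prefix] at hp; simp [hp]))⟩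
      · simp only [Bool.or_eq_true] at h
        rcases h with h | h <;>
        · obtain ⟨i, hi, hp⟩ := (isIn_iff_pos _ name (by decide)).mp h
          exact ⟨i, hi, (prAt_le_iff _ i j).mpr (Or.inr (Or.inl ⟨hja, by simp [List.isPrefixOf_iff_prefix] at hp; simp [hp]⟩))⟩
      · simp only [Bool.or_eq_true] at h
        rcases h with h | h <;>
        · obtain ⟨i, hi, hp⟩ := (isIn_iff_pos _ name (by decide)).mp h
          exact ⟨i, hi, (prAt_le_iff _ i j).mpr (Or.inr (Or.inr (Or.inl ⟨hjb, by simp [List.isPrefixOf_iff_prefix] at hp; simp [hp]⟩)))⟩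
      · simp only [Bool.or_eq_true] at h
        rcases h with h | h <;>
        · obtain ⟨i, hi, hp⟩ := (isIn_iff_pos _ name (by decide)).mp h
          exact ⟨i, hi, (prAt_le_iff _ i j).mpr (Or.inr (Or.inr (Or.inr (Or.inl ⟨hjc, by simp [List.isPrefixOf_iff_prefix] at hp; simp [hp]⟩))))⟩
  have hle4 : pvBest name.toList ≤ 4 := by
    unfold pvBest; rw [foldl_min_le_iff]; exact Or.inl le_rfl
  have k0 := key 0 (by omega)
  have k1 := key 1 (by omega)
  have k2 := key 2 (by omega)
  have k3 := key 3 (by omega)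
  split_ifs with c0 c1 c2 c3
  · have h := k0.mpr (Or.inl c0)
    omega
  · have hle := k1.mpr (Or.inr (Or.inl ⟨le_refl 1, c1⟩))
    have hnot : ¬ pvBest name.toList ≤ 0 := by
      intro h
      rcases k0.mp h with h | ⟨h, _⟩ | ⟨h, _⟩ | ⟨h, _⟩
      · exact c0 h
      all_goals omega
    omega
  · have hle := k2.mpr (Or.inr (Or.inr (Or.inl ⟨le_refl 2, c2⟩)))
    have hnot : ¬ pvBest name.toList ≤ 1 := by
      intro h
      rcases k1.mp h with h | ⟨_, h⟩ | ⟨h, _⟩ | ⟨h, _⟩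
      · exact c0 h
      · exact c1 h
      all_goals omega
    omega
  · have hle := k3.mpr (Or.inr (Or.inr (Or.inr ⟨le_refl 3, c3⟩)))
    have hnot : ¬ pvBest name.toList ≤ 2 := by
      intro h
      rcases k2.mp h with h | ⟨_, h⟩ | ⟨_, h⟩ | ⟨h, _⟩
      · exact c0 h
      · exact c1 h
      · exact c2 h
      · omega
    omega
  · have hnot : ¬ pvBest name.toList ≤ 3 := by
      intro h
      rcases k3.mp h with h | ⟨_, h⟩ | ⟨_, h⟩ | ⟨_, h⟩
      · exact c0 h
      · exact c1 h
      · exact c2 h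
      · exact c3 h
    omega

theorem pvLine_eq (name : String) :
    pvLineA name = "        " ++ name ++ " = data.get('" ++ name ++ "', " ++ pvDefaults.getD (pvBest name.toList) "None" ++ ")" := by
  rw [pvBest_eq]
  unfold pvLineA pvDefaults
  split_ifs <;> rfl

-- ===== VERDICT (by name: the statement is the Claim_ definition above) =====
theorem generate_input_extraction_spec : Claim_equal_generate_input_extraction := by
  intro inputs _
  unfold Spec_generate_input_extraction generate_input_extraction generate_input_extraction_alt
  rw [PySem.List.foldl_append_singleton_eq_map, PySem.List.foldl_append_singleton_eq_map]
  congr 1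
  exact List.map_congr_left (fun name _ => pvLine_eq name)
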